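-- pv_equiv track=rewrite | github.com/ngavca/streamlit | main.py | freq_data
-- ===== SOURCE A (Python) =====
-- def freq_data(data, countries, height):
--     freq_dict = {}
--
--     for country in countries:
--         freq = 0
--         for i in range(len(data)):
--             if data[i][1] == country and height >= data[i][2]:
--                 freq += 1
--         freq_dict[country] = freq
--
--     return freq_dict
-- ===== SOURCE B (Python) =====
-- def freq_data(data, countries, height):
--     counts = dict.fromkeys(countries, 0)
--     for row in data:
--         c = row[1]
--         if c in counts and height >= row[2]:
--             counts[c] += 1
--     return counts
-- ===== Notes on version B (the rewrite author's own statement) =====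
-- stated objective: faster
-- what changed: Replace the nested loop (one full scan of data per country) by initialising every country's count to 0 and a single pass over data incrementing the matching country's counter.
import Mathlib
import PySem

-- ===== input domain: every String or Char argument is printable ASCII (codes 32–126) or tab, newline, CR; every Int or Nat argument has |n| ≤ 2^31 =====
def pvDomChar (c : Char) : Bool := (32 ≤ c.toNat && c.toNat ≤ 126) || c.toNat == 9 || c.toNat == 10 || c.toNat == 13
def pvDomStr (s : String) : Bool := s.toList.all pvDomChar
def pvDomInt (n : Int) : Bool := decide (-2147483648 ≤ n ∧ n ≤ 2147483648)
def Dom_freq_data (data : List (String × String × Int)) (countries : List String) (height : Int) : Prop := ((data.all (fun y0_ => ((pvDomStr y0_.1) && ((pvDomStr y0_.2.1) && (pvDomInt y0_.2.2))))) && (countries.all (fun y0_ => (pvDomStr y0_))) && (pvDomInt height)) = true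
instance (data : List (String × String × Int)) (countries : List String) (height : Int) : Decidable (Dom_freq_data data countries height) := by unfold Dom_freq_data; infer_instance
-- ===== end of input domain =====

-- B replaces A's nested loop (one full scan of data per country) by a zero-initialised
-- counter dict and a single pass over data (asymptotically faster, measured by the check).


-- ===== PORT A =====
-- for country in countries: scan all of data by index, count matches, freq_dict[country] = freq
def freq_data (data : List (String × String × Int)) (countries : List String) (height : Int) : List (String × Int) :=
  (countries.foldl (fun d country =>
      d.insert country
        ((PySem.List.pyRange 0 (PySem.List.len data)).foldl
          (fun freq i =>
            if (PySem.List.pyGetD data i ("", "", 0)).2.1 = country ∧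
               height ≥ (PySem.List.pyGetD data i ("", "", 0)).2.2
            then freq + 1 else freq) (0 : Int)))
    PySem.Dict.empty).items

-- ===== PORT B =====
-- counts = dict.fromkeys(countries, 0); one pass over data incrementing counts[row[1]]
def freq_data_alt (data : List (String × String × Int)) (countries : List String) (height : Int) : List (String × Int) :=
  let counts := countries.foldl (fun d c => d.insert c (0 : Int)) PySem.Dict.empty
  (data.foldl (fun d row =>
      if d.contains row.2.1 ∧ height ≥ row.2.2
      then d.modify row.2.1 0 (· + 1) else d) counts).items

-- ===== PRECONDITION & SPEC =====
def Spec_freq_data (data : List (String × String × Int)) (countries : List String) (height : Int) (out : List (String × Int)) : Prop := out = freq_data_alt data countries height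
instance (data : List (String × String × Int)) (countries : List String) (height : Int) (out : List (String × Int)) : Decidable (Spec_freq_data data countries height out) := by unfold Spec_freq_data; infer_instance

-- ===== CLAIM (what is proved, stated in full; the proofs are below) =====
def Claim_equal_freq_data : Prop := ∀ (data : List (String × String × Int)) (countries : List String) (height : Int), Dom_freq_data data countries height → Spec_freq_data data countries height (freq_data data countries height)

-- ===== LEMMAS AND PROOFS =====

-- the per-country count both programs compute
def pvCnt (data : List (String × String × Int)) (height : Int) (x : String) : Int :=
  (data.countP (fun r => decide (r.2.1 = x ∧ height ≥ r.2.2)) : Int)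

-- a fold of inserts with values depending only on the key: final lookup
theorem getD_foldl_insert_fun (g : String → Int) (l : List String)
    (d : PySem.Dict String Int) (x : String) :
    (l.foldl (fun d c => d.insert c (g c)) d).getD x 0
      = if x ∈ l then g x else d.getD x 0 := by
  induction l generalizing d with
  | nil => simp
  | cons c t ih =>
    simp only [List.foldl_cons, ih, List.mem_cons]
    by_cases hx : x ∈ t
    · simp [hx]
    · by_cases hc : x = c
      · simp [hx, hc, PySem.Dict.getD_insert]
      · simp [hx, hc, PySem.Dict.getD_insert]

-- B's counting pass never changes the key list
theorem keys_foldl_step (height : Int) (rows : List (String × String × Int))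
    (d : PySem.Dict String Int) :
    (rows.foldl (fun d row =>
        if d.contains row.2.1 ∧ height ≥ row.2.2
        then d.modify row.2.1 0 (· + 1) else d) d).keys = d.keys := by
  induction rows generalizing d with
  | nil => rfl
  | cons r t ih =>
    simp only [List.foldl_cons, ih]
    by_cases h : d.contains r.2.1 = true ∧ height ≥ r.2.2
    · simp [h.2, h.1, PySem.Dict.keys_modify, PySem.Dict.keys_insert_of_contains _ _ h.1]
    · rw [if_neg h]

-- B's counting pass adds the match count to each contained key
theorem getD_foldl_step (height : Int) (rows : List (String × String × Int))
    (d : PySem.Dict String Int) (x : String) (hx : d.contains x = true) :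
    (rows.foldl (fun d row =>
        if d.contains row.2.1 ∧ height ≥ row.2.2
        then d.modify row.2.1 0 (· + 1) else d) d).getD x 0
      = d.getD x 0 + pvCnt rows height x := by
  induction rows generalizing d with
  | nil => simp [pvCnt]
  | cons r t ih =>
    simp only [List.foldl_cons]
    by_cases h : d.contains r.2.1 = true ∧ height ≥ r.2.2
    · have hx' : (d.modify r.2.1 0 (· + 1)).contains x = true := by
        simp [PySem.Dict.contains_modify, hx]
      rw [if_pos h, ih _ hx', PySem.Dict.getD_modify]
      by_cases he : x = r.2.1
      · simp [pvCnt, he.symm, h.2]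
        ring
      · have : r.2.1 ≠ x := fun hh => he hh.symm
        simp [pvCnt, he, this]
    · rw [if_neg h, ih _ hx]
      · have : ¬ (r.2.1 = x ∧ height ≥ r.2.2) := by
          rcases Decidable.not_and_iff_not_or_not.mp h with h1 | h2
          · intro hh; exact h1 (hh.1 ▸ hx)
          · intro hh; exact h2 hh.2
        simp [pvCnt, this]

-- ===== VERDICT (by name: the statement is the Claim_ definition above) =====
theorem freq_data_spec : Claim_equal_freq_data := by
  intro data countries height _
  unfold Spec_freq_data freq_data freq_data_alt
  -- rewrite A's inner index loop into a direct count over data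
  have hA : ∀ country : String,
      (PySem.List.pyRange 0 (PySem.List.len data)).foldl
        (fun freq i =>
          if (PySem.List.pyGetD data i ("", "", 0)).2.1 = country ∧
             height ≥ (PySem.List.pyGetD data i ("", "", 0)).2.2
          then freq + 1 else freq) (0 : Int) = pvCnt data height country := by
    intro country
    rw [PySem.List.foldl_pyRange_zero_pyGetD data ("", "", 0)
        (fun freq r => if r.2.1 = country ∧ height ≥ r.2.2 then freq + 1 else freq) 0]
    have := PySem.List.foldl_count_if
      (fun r : String × String × Int => decide (r.2.1 = country ∧ height ≥ r.2.2)) data 0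
    simp only [decide_eq_true_eq] at this
    simpa [pvCnt] using this
  simp only [hA]
  -- both sides: compare items via keys + getD
  set dA := countries.foldl (fun d c => d.insert c (pvCnt data height c)) PySem.Dict.empty with hdA
  set d0 := countries.foldl (fun d c => d.insert c (0 : Int)) PySem.Dict.empty with hd0
  set dB := data.foldl (fun d row =>
      if d.contains row.2.1 ∧ height ≥ row.2.2
      then d.modify row.2.1 0 (· + 1) else d) d0 with hdB
  have hkA : dA.keys = PySem.Set.ofList countries := by
    rw [hdA, PySem.Dict.keys_foldl_insert countries (fun _ c => pvCnt data height c)]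
    simp [PySem.Dict.keys_empty]; rfl
  have hk0 : d0.keys = PySem.Set.ofList countries := by
    rw [hd0, PySem.Dict.keys_foldl_insert countries (fun _ _ => (0 : Int))]
    simp [PySem.Dict.keys_empty]; rfl
  have hkB : dB.keys = PySem.Set.ofList countries := by
    rw [hdB, keys_foldl_step, hk0]
  have hndA : dA.keys.Nodup := by rw [hkA]; exact PySem.Set.nodup_ofList countries
  have hndB : dB.keys.Nodup := by rw [hkB]; exact PySem.Set.nodup_ofList countries
  show dA.items = dB.items
  rw [PySem.Dict.items_eq_map_keys dA hndA 0, PySem.Dict.items_eq_map_keys dB hndB 0,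
      hkA, hkB]
  apply List.map_congr_left
  intro k hk
  have hkmem : k ∈ countries := (PySem.Set.mem_ofList countries k).mp hk
  have h0c : d0.contains k = true := by
    rw [PySem.Dict.contains_iff_mem_keys, hk0, PySem.Set.mem_ofList]; exact hkmem
  have hB : dB.getD k 0 = pvCnt data height k := by
    rw [hdB, getD_foldl_step height data d0 k h0c, hd0,
        getD_foldl_insert_fun (fun _ => (0 : Int)) countries PySem.Dict.empty k]
    simp [hkmem]
  have hAv : dA.getD k 0 = pvCnt data height k := by
    rw [hdA, getD_foldl_insert_fun (fun c => pvCnt data height c) countries PySem.Dict.empty k]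
    simp [hkmem]
  rw [hAv, hB]
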